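-- pv_equiv track=rewrite | github.com/drellem2/one_third_width_three | lean/scripts/enum_case3.py | build_perm_relabelings
-- ===== SOURCE A (Python) =====
-- from itertools import permutations, product
--
-- def build_perm_relabelings(band_sizes: list[int]) -> list[list[int]]:
--     """
--     Precompute all element relabelings induced by within-band permutations.
--     Each relabeling is a list `new_idx` of length n such that element e maps
--     to `new_idx[e]` under the permutation.
--     """
--     offsets = [0]
--     for ns in band_sizes:
--         offsets.append(offsets[-1] + ns)
--     n = offsets[-1]
--     perms_per_band = [list(permutations(range(ns))) for ns in band_sizes]
--     out = []
--     for perm_tuple in product(*perms_per_band):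
--         new_idx = [0] * n
--         for i, perm in enumerate(perm_tuple):
--             for local, mapped in enumerate(perm):
--                 new_idx[offsets[i] + local] = offsets[i] + mapped
--         out.append(new_idx)
--     return out
-- ===== SOURCE B (Python) =====
-- def _fact(n: int) -> int:
--     f = 1
--     for i in range(2, n + 1):
--         f *= i
--     return f
--
--
-- def build_perm_relabelings(band_sizes: list[int]) -> list[list[int]]:
--     """
--     Precompute all element relabelings induced by within-band permutations.
--     Pure arithmetic unranking: relabeling number r is decoded from r in a
--     factorial mixed-radix system, one lexicographic permutation rank per band.
--     No permutation or product is ever materialised.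
--     """
--     offsets = []
--     off = 0
--     for ns in band_sizes:
--         offsets.append(off)
--         off += ns
--     total = 1
--     for ns in band_sizes:
--         total *= _fact(ns)
--     out = []
--     for r in range(total):
--         new_idx = []
--         rem = r
--         weight = total
--         for i, ns in enumerate(band_sizes):
--             f = _fact(ns)
--             weight //= f
--             d = rem // weight      # this band's permutation rank
--             rem %= weight
--             avail = list(range(ns))
--             g = f
--             k = d
--             while avail:
--                 g //= len(avail)
--                 new_idx.append(offsets[i] + avail.pop(k // g))
--                 k %= g
--         out.append(new_idx)
--     return out
-- ===== Notes on version B (the rewrite author's own statement) =====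
-- stated objective: alternative
-- what changed: Replaced enumeration (itertools.permutations per band combined by itertools.product and written into a preallocated array) by pure arithmetic unranking: relabeling number r is decoded from r in a factorial mixed-radix system, each band's digit being a lexicographic permutation rank unranked via a Lehmer-code pop loop; no permutation list or product is ever materialised.
-- outside the precondition, e.g. on build_perm_relabelings([-1, 2]): A returns [[0], [-1]], B returns [[-1, 0], [0, -1]]; on build_perm_relabelings([2, -1]): A raises IndexError, B returns [[0, 1], [1, 0]]
import Mathlib
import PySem

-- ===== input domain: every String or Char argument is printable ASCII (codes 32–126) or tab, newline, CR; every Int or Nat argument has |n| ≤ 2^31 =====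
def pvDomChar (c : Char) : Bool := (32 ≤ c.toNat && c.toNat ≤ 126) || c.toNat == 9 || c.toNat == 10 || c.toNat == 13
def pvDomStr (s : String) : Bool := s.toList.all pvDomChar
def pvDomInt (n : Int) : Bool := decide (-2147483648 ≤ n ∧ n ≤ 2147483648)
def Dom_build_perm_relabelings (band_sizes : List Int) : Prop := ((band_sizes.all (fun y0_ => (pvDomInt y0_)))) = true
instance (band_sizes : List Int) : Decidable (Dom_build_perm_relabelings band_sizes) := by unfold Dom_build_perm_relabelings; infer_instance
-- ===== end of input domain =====

-- B replaces enumeration (permutations per band combined by product) by arithmetic unranking: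
-- relabeling r is decoded from r in a factorial mixed-radix system (alternative algorithm).


-- ===== PORT A =====
-- Library helper: itertools.permutations(l) in itertools order (for sorted input,
-- lexicographic): pick each element in list order, recurse on the remainder.
def pySelections : List Int → List (Int × List Int)
  | [] => []
  | x :: xs => (x, xs) :: (pySelections xs).map (fun p => (p.1, x :: p.2))

def pyPermsFuel : Nat → List Int → List (List Int)
  | 0, _ => [[]]
  | n + 1, l => (pySelections l).flatMap (fun p => (pyPermsFuel n p.2).map (fun q => p.1 :: q))

def pyPermutations (l : List Int) : List (List Int) := pyPermsFuel l.length l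

-- itertools.product(*ls): last component varies fastest.
def pyProduct : List (List (List Int)) → List (List (List Int))
  | [] => [[]]
  | l :: ls => l.flatMap (fun x => (pyProduct ls).map (fun t => x :: t))

def build_perm_relabelings (band_sizes : List Int) : List (List Int) :=
  let offsets := band_sizes.foldl
    (fun offs ns => offs ++ [(PySem.List.pyGet? offs (-1)).getD 0 + ns]) [0]
  -- offsets is always nonempty, so offsets[-1] never raises; .getD 0 is unreachable
  let n := (PySem.List.pyGet? offsets (-1)).getD 0
  let perms_per_band := band_sizes.map (fun ns => pyPermutations (PySem.List.pyRange 0 ns 1))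
  (pyProduct perms_per_band).foldl
    (fun out perm_tuple =>
      let new_idx := (PySem.List.enumerate perm_tuple 0).foldl
        (fun ni ip =>
          (PySem.List.enumerate ip.2 0).foldl
            (fun ni2 lm =>
              -- new_idx[offsets[i]+local] = offsets[i]+mapped ; Python raises when the
              -- index is out of range (pySetD total form, excluded by Pre_); offsets[i]
              -- itself is always in range (i < len(offsets))
              PySem.List.pySetD ni2 (PySem.List.pyGetD offsets ip.1 0 + lm.1)
                (PySem.List.pyGetD offsets ip.1 0 + lm.2))
            ni)
        (List.replicate n.toNat 0)
      out ++ [new_idx]) []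

-- ===== PORT B =====
-- _fact(n): f = 1; for i in range(2, n+1): f *= i
def factP (ns : Int) : Int := (PySem.List.pyRange 2 (ns + 1) 1).foldl (fun f i => f * i) 1

-- the 'while avail:' Lehmer unranking loop; fuel = len(avail) is exact since each pop
-- removes one element; the pop index is in range whenever 0 <= k < g, so the .getD
-- default is unreachable there (outside Pre_ Python would raise IndexError).
def unrankLoop : Nat → List Int → Int → Int → Int → List Int
  | 0, _, _, _, _ => []
  | m + 1, avail, g, k, off =>
      let g' := PySem.Int.floordiv g (avail.length : Int)
      let p := (PySem.List.pop? avail (PySem.Int.floordiv k g')).getD (0, [])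
      (off + p.1) :: unrankLoop m p.2 g' (PySem.Int.mod k g') off

def build_perm_relabelings_alt (band_sizes : List Int) : List (List Int) :=
  let st := band_sizes.foldl (fun st ns => (st.1 ++ [st.2], st.2 + ns)) (([] : List Int), (0 : Int))
  let offsets := st.1
  let total := band_sizes.foldl (fun t ns => t * factP ns) 1
  (PySem.List.pyRange 0 total 1).foldl
    (fun out r =>
      let dec := (PySem.List.enumerate band_sizes 0).foldl
        (fun st2 ins =>
          let f := factP ins.2
          let weight := PySem.Int.floordiv st2.2.2 f
          let d := PySem.Int.floordiv st2.2.1 weight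
          let rem := PySem.Int.mod st2.2.1 weight
          let avail := PySem.List.pyRange 0 ins.2 1
          (st2.1 ++ unrankLoop avail.length avail f d (PySem.List.pyGetD offsets ins.1 0),
           (rem, weight)))
        (([] : List Int), (r, total))
      out ++ [dec.1]) []

-- ===== PRECONDITION & SPEC =====
-- Pre_ excludes lists mixing negative band sizes (outside the natural domain: band sizes
-- are counts) with positive ones: there A either raises IndexError or returns accidental
-- values via Python's negative-index wraparound; all-nonpositive lists are kept (both
-- programs return the single empty relabeling there, which the claim covers).
def Pre_build_perm_relabelings (band_sizes : List Int) : Prop :=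
  (∀ ns ∈ band_sizes, 0 ≤ ns) ∨ (∀ ns ∈ band_sizes, ns ≤ 0)
instance (band_sizes : List Int) : Decidable (Pre_build_perm_relabelings band_sizes) := by
  unfold Pre_build_perm_relabelings; infer_instance

def pvWitness_build_perm_relabelings : List Int := [2, 1]

def Spec_build_perm_relabelings (band_sizes : List Int) (out : List (List Int)) : Prop := out = build_perm_relabelings_alt band_sizes
instance (band_sizes : List Int) (out : List (List Int)) : Decidable (Spec_build_perm_relabelings band_sizes out) := by unfold Spec_build_perm_relabelings; infer_instance

-- ===== CLAIM (what is proved, stated in full; the proofs are below) =====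
def Claim_equal_build_perm_relabelings : Prop := ∀ (band_sizes : List Int), Dom_build_perm_relabelings band_sizes → Pre_build_perm_relabelings band_sizes → Spec_build_perm_relabelings band_sizes (build_perm_relabelings band_sizes)

-- ===== LEMMAS AND PROOFS =====

-- The common normal form both ports are reduced to: for each band, every shifted
-- permutation of that band, later bands varying fastest.
def shiftedProd : Int → List Int → List (List Int)
  | _, [] => [[]]
  | off, ns :: rest =>
      ((pyPermutations (PySem.List.pyRange 0 ns 1)).map (fun perm => perm.map (fun m => off + m))).flatMap
        (fun t => (shiftedProd (off + ns) rest).map (fun s => t ++ s))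

-- ---------- A-side ----------

theorem selections_len (l : List Int) : ∀ p ∈ pySelections l, p.2.length + 1 = l.length := by
  induction l with
  | nil => simp [pySelections]
  | cons x xs ih =>
    intro p hp
    simp [pySelections] at hp
    rcases hp with h | ⟨q, r, hq, rfl⟩
    · simp [h]
    · simpa using ih (q, r) hq

theorem permsFuel_len (n : Nat) : ∀ (l : List Int), l.length = n → ∀ q ∈ pyPermsFuel n l, q.length = n := by
  induction n with
  | zero => intro l _ q hq; simp [pyPermsFuel] at hq; simp [hq]
  | succ n ih =>
    intro l hl q hq
    simp [pyPermsFuel] at hq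
    obtain ⟨a, rest, hmem, q', hq', rfl⟩ := hq
    have hr := selections_len l (a, rest) hmem
    simp at hr
    have : rest.length = n := by omega
    simpa using ih rest this q' hq'

theorem perm_len (ns : Int) (q : List Int) (hq : q ∈ pyPermutations (PySem.List.pyRange 0 ns 1)) :
    q.length = ns.toNat := by
  have := permsFuel_len (PySem.List.pyRange 0 ns 1).length _ rfl q hq
  simpa [PySem.List.length_pyRange_one] using this

theorem pyGet?_concat_neg_one (pre : List Int) (a : Int) :
    PySem.List.pyGet? (pre ++ [a]) (-1) = some a := by
  simp [PySem.List.pyGet?, PySem.List.pyIdx?]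

theorem foldl_append_map {α β : Type} (L : List α) (f : α → β) (acc : List β) :
    L.foldl (fun out t => out ++ [f t]) acc = acc ++ L.map f := by
  induction L generalizing acc with
  | nil => simp
  | cons x xs ih => simp [ih]

theorem sum_toNat (sizes : List Int) (h : ∀ ns ∈ sizes, 0 ≤ ns) :
    (((sizes.map Int.toNat).sum : Nat) : Int) = sizes.sum := by
  induction sizes with
  | nil => simp
  | cons x xs ih =>
    simp only [List.map_cons, List.sum_cons]
    have h2 := ih (fun ns hns => h ns (by simp [hns]))
    have := h x (by simp)
    push_cast at h2 ⊢
    omega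

def offsList (a : Int) : List Int → List Int
  | [] => [a]
  | ns :: rest => a :: offsList (a + ns) rest

theorem offs_fold (sizes : List Int) : ∀ (pre : List Int) (a : Int),
    sizes.foldl (fun offs ns => offs ++ [(PySem.List.pyGet? offs (-1)).getD 0 + ns]) (pre ++ [a])
    = pre ++ offsList a sizes := by
  induction sizes with
  | nil => intro pre a; simp [offsList]
  | cons ns rest ih =>
    intro pre a
    simp only [List.foldl_cons, pyGet?_concat_neg_one, Option.getD_some, offsList]
    rw [show pre ++ [a] ++ [a + ns] = (pre ++ [a]) ++ [a + ns] by simp, ih (pre ++ [a]) (a + ns)]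
    simp

theorem offsList_concat (sizes : List Int) : ∀ (a : Int),
    ∃ pre, offsList a sizes = pre ++ [a + sizes.sum] := by
  induction sizes with
  | nil => intro a; exact ⟨[], by simp [offsList]⟩
  | cons ns rest ih =>
    intro a
    obtain ⟨pre, hpre⟩ := ih (a + ns)
    exact ⟨a :: pre, by simp [offsList, hpre]; ring_nf⟩

theorem offsList_last (sizes : List Int) (a : Int) :
    (PySem.List.pyGet? (offsList a sizes) (-1)).getD 0 = a + sizes.sum := by
  obtain ⟨pre, hpre⟩ := offsList_concat sizes a
  rw [hpre, pyGet?_concat_neg_one]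
  rfl

theorem offsList_getD (sizes : List Int) : ∀ (a : Int) (j : Nat), j ≤ sizes.length →
    PySem.List.pyGetD (offsList a sizes) (j : Int) 0 = a + (sizes.take j).sum := by
  induction sizes with
  | nil =>
    intro a j hj
    have : j = 0 := by simpa using hj
    subst this
    simp [offsList]
  | cons ns rest ih =>
    intro a j hj
    cases j with
    | zero => simp [offsList]
    | succ j =>
      rw [show offsList a (ns :: rest) = a :: offsList (a + ns) rest from rfl]
      rw [PySem.List.pyGetD_natCast, List.getD_cons_succ, ← PySem.List.pyGetD_natCast,
        ih (a + ns) j (by simpa using hj)]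
      simp [List.take_succ_cons]
      ring

theorem inner_fold (o : Int) (perm : List Int) : ∀ (s : Int) (pre : List Int) (k : Nat),
    o + s = (pre.length : Int) → perm.length ≤ k →
    (PySem.List.enumerate perm s).foldl
      (fun ni2 lm => PySem.List.pySetD ni2 (o + lm.1) (o + lm.2)) (pre ++ List.replicate k 0)
    = pre ++ perm.map (fun m => o + m) ++ List.replicate (k - perm.length) 0 := by
  induction perm with
  | nil => intro s pre k _ _; simp [PySem.List.enumerate_nil]
  | cons m rest ih =>
    intro s pre k hs hk
    obtain ⟨k', rfl⟩ : ∃ k', k = k' + 1 := ⟨k - 1, by simp at hk; omega⟩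
    rw [PySem.List.enumerate_cons, List.foldl_cons]
    have hset : PySem.List.pySetD (pre ++ List.replicate (k' + 1) 0) (o + s) (o + m)
        = (pre ++ [o + m]) ++ List.replicate k' 0 := by
      rw [PySem.List.pySetD_of_nonneg _ _ (show (0:Int) ≤ o + s by omega)]
      have : (o + s).toNat = pre.length := by omega
      rw [this, List.set_append_right _ _ (le_refl _)]
      simp [List.replicate_succ]
    rw [hset, ih (s + 1) (pre ++ [o + m]) k' (by simp; omega) (by simp at hk ⊢; omega)]
    simp [List.map_cons]

theorem main_fold (sizes : List Int) : ∀ (O : Int → Int) (s : Int) (pre : List Int) (k : Nat),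
    (∀ ns ∈ sizes, 0 ≤ ns) →
    O s = (pre.length : Int) →
    (∀ j : Nat, j < sizes.length → O (s + (j : Int) + 1) = O (s + (j : Int)) + sizes.getD j 0) →
    (sizes.map Int.toNat).sum ≤ k →
    (pyProduct (sizes.map (fun ns => pyPermutations (PySem.List.pyRange 0 ns 1)))).map
      (fun perm_tuple => (PySem.List.enumerate perm_tuple s).foldl
        (fun ni ip => (PySem.List.enumerate ip.2 0).foldl
          (fun ni2 lm => PySem.List.pySetD ni2 (O ip.1 + lm.1) (O ip.1 + lm.2)) ni)
        (pre ++ List.replicate k 0))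
    = (shiftedProd (O s) sizes).map
        (fun tail => pre ++ tail ++ List.replicate (k - (sizes.map Int.toNat).sum) 0) := by
  induction sizes with
  | nil =>
    intro O s pre k _ _ _ _
    simp [pyProduct, shiftedProd, PySem.List.enumerate_nil]
  | cons ns rest ih =>
    intro O s pre k hnn hOs hstep hk
    have hns0 : 0 ≤ ns := hnn ns (by simp)
    simp only [List.map_cons, pyProduct, shiftedProd, List.map_flatMap, List.flatMap_map,
      List.map_map]
    refine List.flatMap_congr ?_
    intro t ht
    have hlen := perm_len ns t ht
    have hksum : ns.toNat + (rest.map Int.toNat).sum ≤ k := by simpa using hk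
    have hinner := inner_fold (O s) t 0 pre k (by simpa using hOs) (by omega)
    rw [hlen] at hinner
    simp only [Function.comp_def, PySem.List.enumerate_cons, List.foldl_cons]
    simp only [hinner]
    have hO1 : O (s + 1) = O s + ns := by
      have h := hstep 0 (by simp)
      simpa using h
    have hstep' : ∀ j : Nat, j < rest.length →
        O ((s + 1) + (j : Int) + 1) = O ((s + 1) + (j : Int)) + rest.getD j 0 := by
      intro j hj
      have h := hstep (j + 1) (by simp; omega)
      have e : s + ((j + 1 : Nat) : Int) = (s + 1) + (j : Int) := by push_cast; ring
      rw [e] at h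
      simpa using h
    have hOs' : O (s + 1) = (((pre ++ t.map (fun m => O s + m)).length : Nat) : Int) := by
      rw [hO1]
      simp [hlen, hOs]
      omega
    rw [ih O (s + 1) (pre ++ t.map (fun m => O s + m)) (k - ns.toNat)
      (fun x hx => hnn x (by simp [hx])) hOs' hstep' (by omega)]
    rw [hO1]
    simp [List.append_assoc, Nat.sub_sub]

theorem A_eq (sizes : List Int) (h : ∀ ns ∈ sizes, 0 ≤ ns) :
    build_perm_relabelings sizes = shiftedProd 0 sizes := by
  have hmsum : (sizes.map Int.toNat).sum = sizes.sum.toNat := by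
    have := sum_toNat sizes h
    omega
  have hsum0 : 0 ≤ sizes.sum := List.sum_nonneg h
  simp only [build_perm_relabelings]
  rw [show sizes.foldl (fun offs ns => offs ++ [(PySem.List.pyGet? offs (-1)).getD 0 + ns])
      [(0 : Int)] = offsList 0 sizes by simpa using offs_fold sizes [] 0]
  rw [offsList_last]
  rw [foldl_append_map]
  have hO0 : (fun i => PySem.List.pyGetD (offsList 0 sizes) i 0) (0 : Int)
      = ((([] : List Int).length : Nat) : Int) := by
    simpa using offsList_getD sizes 0 0 (by omega)
  have hstep : ∀ j : Nat, j < sizes.length →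
      (fun i => PySem.List.pyGetD (offsList 0 sizes) i 0) ((0 : Int) + (j : Int) + 1)
      = (fun i => PySem.List.pyGetD (offsList 0 sizes) i 0) ((0 : Int) + (j : Int)) + sizes.getD j 0 := by
    intro j hj
    have h1 := offsList_getD sizes 0 j (by omega)
    have h2 := offsList_getD sizes 0 (j + 1) (by omega)
    have h3 : (sizes.take (j + 1)).sum = (sizes.take j).sum + sizes.getD j 0 := by
      rw [List.getD_eq_getElem _ _ hj, List.sum_take_succ _ _ hj]
    simp only []
    rw [show (0 : Int) + (j : Int) + 1 = ((j + 1 : Nat) : Int) by push_cast; ring,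
      show (0 : Int) + (j : Int) = ((j : Nat) : Int) from by ring]
    rw [h1, h2, h3]
    ring
  have hmain := main_fold sizes (fun i => PySem.List.pyGetD (offsList 0 sizes) i 0)
    0 [] (0 + sizes.sum).toNat h hO0 hstep (by simp [hmsum])
  simp only [List.nil_append] at hmain
  rw [hmain]
  have hO0' : PySem.List.pyGetD (offsList 0 sizes) 0 0 = 0 := by simpa using hO0
  have hc : (0 + sizes.sum).toNat - (sizes.map Int.toNat).sum = 0 := by omega
  rw [hO0']
  have hc2 : sizes.sum.toNat - (sizes.map Int.toNat).sum = 0 := by omega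
  simp [hc2]

theorem perms_nonpos (ns : Int) (h : ns ≤ 0) :
    pyPermutations (PySem.List.pyRange 0 ns 1) = [[]] := by
  rw [PySem.List.pyRange_one_eq_nil h]
  rfl

theorem shiftedProd_nonpos (sizes : List Int) : ∀ (off : Int), (∀ ns ∈ sizes, ns ≤ 0) →
    shiftedProd off sizes = [[]] := by
  induction sizes with
  | nil => intro off _; rfl
  | cons ns rest ih =>
    intro off h
    simp only [shiftedProd, perms_nonpos ns (h ns (by simp)),
      ih (off + ns) (fun x hx => h x (by simp [hx]))]
    simp

theorem pyProduct_trivial (sizes : List Int) :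
    pyProduct (sizes.map (fun _ => [[]])) = [sizes.map (fun _ => ([] : List Int))] := by
  induction sizes with
  | nil => rfl
  | cons ns rest ih =>
    simp only [List.map_cons, pyProduct, ih]
    rfl

theorem fold_nil_tuple (tuple : List (List Int)) (g : Int → Int) :
    ∀ (s : Int) (init : List Int), (∀ t ∈ tuple, t = []) →
    (PySem.List.enumerate tuple s).foldl
      (fun ni ip => (PySem.List.enumerate ip.2 0).foldl
        (fun ni2 lm => PySem.List.pySetD ni2 (g ip.1 + lm.1) (g ip.1 + lm.2)) ni) init = init := by
  induction tuple with
  | nil => intro s init _; simp [PySem.List.enumerate_nil]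
  | cons t rest ih =>
    intro s init hall
    rw [PySem.List.enumerate_cons, List.foldl_cons]
    rw [show t = [] from hall t (by simp)]
    simp only [PySem.List.enumerate_nil, List.foldl_nil]
    exact ih (s + 1) init (fun x hx => hall x (by simp [hx]))

theorem sum_nonpos_aux (sizes : List Int) (h : ∀ ns ∈ sizes, ns ≤ 0) : sizes.sum ≤ 0 := by
  induction sizes with
  | nil => simp
  | cons x xs ih =>
    have h1 := h x (by simp)
    have h2 := ih (fun y hy => h y (by simp [hy]))
    simp only [List.sum_cons]
    omega

theorem A_eq_nonpos (sizes : List Int) (h : ∀ ns ∈ sizes, ns ≤ 0) :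
    build_perm_relabelings sizes = [[]] := by
  have hsum : sizes.sum ≤ 0 := sum_nonpos_aux sizes h
  simp only [build_perm_relabelings]
  rw [show sizes.foldl (fun offs ns => offs ++ [(PySem.List.pyGet? offs (-1)).getD 0 + ns])
      [(0 : Int)] = offsList 0 sizes by simpa using offs_fold sizes [] 0]
  rw [offsList_last]
  rw [show sizes.map (fun ns => pyPermutations (PySem.List.pyRange 0 ns 1))
      = sizes.map (fun _ => [[]]) from
    List.map_congr_left (fun ns hns => perms_nonpos ns (h ns hns))]
  rw [pyProduct_trivial]
  rw [show (0 + sizes.sum).toNat = 0 by omega]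
  simp only [List.replicate_zero, List.foldl_cons, List.foldl_nil]
  rw [fold_nil_tuple (sizes.map (fun _ => ([] : List Int)))
    (fun i => PySem.List.pyGetD (offsList 0 sizes) i 0) 0 [] (by simp)]
  simp

-- ---------- B-side ----------

-- factP computes the factorial of ns.toNat
theorem factP_natCast (n : Nat) :
    (PySem.List.pyRange 2 ((n : Int) + 1) 1).foldl (fun f i => f * i) 1 = (Nat.factorial n : Int) := by
  induction n with
  | zero => rw [PySem.List.pyRange_one_eq_nil (by omega)]; rfl
  | succ n ih =>
    cases n with
    | zero => rw [PySem.List.pyRange_one_eq_nil (by omega)]; rfl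
    | succ n' =>
      rw [show ((n' + 1 + 1 : Nat) : Int) + 1 = (((n' + 1 : Nat) : Int) + 1) + 1 by push_cast; ring]
      rw [PySem.List.pyRange_one_succ_right (by push_cast; omega), List.foldl_append, ih]
      simp only [List.foldl_cons, List.foldl_nil, Nat.factorial_succ]
      push_cast
      ring

theorem factP_eq (ns : Int) : factP ns = (Nat.factorial ns.toNat : Int) := by
  rcases (by omega : ns ≤ 0 ∨ 0 < ns) with h | h
  · unfold factP
    rw [PySem.List.pyRange_one_eq_nil (by omega)]
    rw [show ns.toNat = 0 by omega]
    rfl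
  · unfold factP
    rw [show ns = ((ns.toNat : Nat) : Int) by omega]
    exact factP_natCast ns.toNat

-- pySelections enumerated by index
theorem selections_eq (l : List Int) :
    pySelections l = (List.range l.length).map (fun d => (l.getD d 0, l.eraseIdx d)) := by
  induction l with
  | nil => rfl
  | cons x xs ih =>
    simp [pySelections, ih, List.range_succ_eq_map, List.map_map, Function.comp_def]

-- decode of range(a*b) as a double loop
theorem range_mul_decode {α : Type} (b : Nat) (hb : 0 < b) (f : Nat → Nat → α) :
    ∀ (a : Nat), (List.range (a * b)).map (fun r => f (r / b) (r % b))
      = (List.range a).flatMap (fun d => (List.range b).map (f d)) := by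
  intro a
  induction a with
  | zero => simp
  | succ a ih =>
    rw [Nat.succ_mul, List.range_add, List.map_append, ih, List.range_succ,
      List.flatMap_append]
    congr 1
    simp only [List.flatMap_cons, List.flatMap_nil, List.append_nil, List.map_map]
    refine List.map_congr_left ?_
    intro t ht
    have ht' : t < b := by simpa using ht
    have hdiv : (a * b + t) / b = a := by
      rw [Nat.add_comm, Nat.mul_comm, Nat.add_mul_div_left _ _ hb, Nat.div_eq_of_lt ht']
      omega
    have hmod : (a * b + t) % b = t := by
      rw [Nat.mul_comm, Nat.mul_add_mod, Nat.mod_eq_of_lt ht']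
    simp [hdiv, hmod]

-- one step of unrankLoop on a list of length n+1 with g = (n+1)!
theorem unrankLoop_step (n : Nat) (l : List Int) (hl : l.length = n + 1) (r : Nat)
    (hr : r < Nat.factorial (n + 1)) (off : Int) :
    unrankLoop (n + 1) l ((Nat.factorial (n + 1) : Nat) : Int) ((r : Nat) : Int) off
      = (off + l.getD (r / Nat.factorial n) 0)
        :: unrankLoop n (l.eraseIdx (r / Nat.factorial n)) ((Nat.factorial n : Nat) : Int)
            ((r % Nat.factorial n : Nat) : Int) off := by
  have hdlt : r / Nat.factorial n < n + 1 := by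
    have hfp := Nat.factorial_pos n
    have : Nat.factorial (n + 1) = (n + 1) * Nat.factorial n := Nat.factorial_succ n
    rw [Nat.div_lt_iff_lt_mul hfp]
    omega
  rw [unrankLoop]
  have hg' : PySem.Int.floordiv ((Nat.factorial (n + 1) : Nat) : Int) ((l.length : Nat) : Int)
      = ((Nat.factorial n : Nat) : Int) := by
    rw [hl, PySem.Int.floordiv_natCast]
    congr 1
    rw [Nat.factorial_succ, Nat.mul_div_cancel_left _ (by omega)]
  simp only [hg', PySem.Int.floordiv_natCast, PySem.Int.mod_natCast]
  have hlt : r / Nat.factorial n < l.length := by omega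
  have hpop : PySem.List.pop? l ((r / Nat.factorial n : Nat) : Int)
      = some (l[r / Nat.factorial n]'hlt, l.eraseIdx (r / Nat.factorial n)) := by
    exact PySem.List.pop?_natCast l _ hlt
  rw [hpop]
  simp [List.getD_eq_getElem?_getD, List.getElem?_eq_getElem hlt]

-- the unranking loop enumerates itertools.permutations, shifted by off
theorem unrank_perms (n : Nat) : ∀ (l : List Int), l.length = n → ∀ (off : Int),
    (List.range (Nat.factorial n)).map
      (fun k => unrankLoop n l ((Nat.factorial n : Nat) : Int) ((k : Nat) : Int) off)
    = (pyPermsFuel n l).map (fun q => q.map (fun m => off + m)) := by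
  induction n with
  | zero => intro l _ off; rfl
  | succ n ih =>
    intro l hl off
    have hfp : 0 < Nat.factorial n := Nat.factorial_pos n
    -- RHS: push the shift map inside, index the selections
    rw [show pyPermsFuel (n + 1) l
        = (pySelections l).flatMap (fun p => (pyPermsFuel n p.2).map (fun q => p.1 :: q)) from rfl]
    rw [selections_eq l, hl]
    rw [List.map_flatMap, List.flatMap_map]
    -- LHS: split range((n+1)!) as range(n+1) x range(n!)
    have hfs : Nat.factorial (n + 1) = (n + 1) * Nat.factorial n := Nat.factorial_succ n
    have hL : (List.range (Nat.factorial (n + 1))).map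
        (fun k => unrankLoop (n + 1) l ((Nat.factorial (n + 1) : Nat) : Int) ((k : Nat) : Int) off)
        = (List.range (Nat.factorial (n + 1))).map
        (fun r => (off + l.getD (r / Nat.factorial n) 0)
          :: unrankLoop n (l.eraseIdx (r / Nat.factorial n)) ((Nat.factorial n : Nat) : Int)
              ((r % Nat.factorial n : Nat) : Int) off) := by
      refine List.map_congr_left ?_
      intro r hr
      exact unrankLoop_step n l hl r (List.mem_range.mp hr) off
    rw [hL, hfs,
      range_mul_decode (Nat.factorial n) hfp
        (fun d k => (off + l.getD d 0)
          :: unrankLoop n (l.eraseIdx d) ((Nat.factorial n : Nat) : Int) ((k : Nat) : Int) off)]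
    refine List.flatMap_congr ?_
    intro d hd
    have hd' : d < n + 1 := by simpa using hd
    have herase : (l.eraseIdx d).length = n := by
      rw [List.length_eraseIdx_of_lt (by omega)]
      omega
    have h1 := ih (l.eraseIdx d) herase off
    rw [show (fun k : Nat => (off + l.getD d 0)
          :: unrankLoop n (l.eraseIdx d) ((Nat.factorial n : Nat) : Int) ((k : Nat) : Int) off)
        = (fun q => (off + l.getD d 0) :: q)
          ∘ (fun k : Nat => unrankLoop n (l.eraseIdx d) ((Nat.factorial n : Nat) : Int) ((k : Nat) : Int) off)
        from rfl]
    rw [← List.map_map, h1]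
    simp [List.map_map, Function.comp_def]

-- total = product of factorials
def prodFact (sizes : List Int) : Nat := (sizes.map (fun ns => Nat.factorial ns.toNat)).prod

theorem total_fold (sizes : List Int) : ∀ (acc : Int),
    sizes.foldl (fun t ns => t * factP ns) acc = acc * (prodFact sizes : Nat) := by
  induction sizes with
  | nil => intro acc; simp [prodFact]
  | cons ns rest ih =>
    intro acc
    rw [List.foldl_cons, ih, factP_eq]
    simp only [prodFact, List.map_cons, List.prod_cons]
    push_cast
    ring

-- the new offsets list built by B's first fold
def offsB (a : Int) : List Int → List Int
  | [] => []
  | ns :: rest => a :: offsB (a + ns) rest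

theorem offsB_fold (sizes : List Int) : ∀ (pre : List Int) (a : Int),
    sizes.foldl (fun st ns => (st.1 ++ [st.2], st.2 + ns)) (pre, a)
    = (pre ++ offsB a sizes, a + sizes.sum) := by
  induction sizes with
  | nil => intro pre a; simp [offsB]
  | cons ns rest ih =>
    intro pre a
    rw [List.foldl_cons,
      show ((pre, a).1 ++ [(pre, a).2], (pre, a).2 + ns) = (pre ++ [a], a + ns) from rfl,
      ih (pre ++ [a]) (a + ns)]
    simp [offsB, List.sum_cons, add_assoc]

theorem offsB_getD (sizes : List Int) : ∀ (a : Int) (j : Nat), j < sizes.length →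
    PySem.List.pyGetD (offsB a sizes) ((j : Nat) : Int) 0 = a + (sizes.take j).sum := by
  induction sizes with
  | nil => intro a j hj; simp at hj
  | cons ns rest ih =>
    intro a j hj
    cases j with
    | zero => simp [offsB]
    | succ j =>
      rw [show offsB a (ns :: rest) = a :: offsB (a + ns) rest from rfl]
      rw [PySem.List.pyGetD_natCast, List.getD_cons_succ, ← PySem.List.pyGetD_natCast,
        ih (a + ns) j (by simpa using hj)]
      simp [List.take_succ_cons]
      ring

-- the band-decode fold produces exactly the r-th relabeling, for every r at once
theorem decode_fold (sizes : List Int) : ∀ (offsets : List Int) (s : Nat) (pre : List Int) (off : Int),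
    (∀ j : Nat, j < sizes.length → PySem.List.pyGetD offsets (((s + j : Nat) : Nat) : Int) 0
      = off + (sizes.take j).sum) →
    (List.range (prodFact sizes)).map (fun r =>
      ((PySem.List.enumerate sizes ((s : Nat) : Int)).foldl
        (fun st2 ins =>
          let f := factP ins.2
          let weight := PySem.Int.floordiv st2.2.2 f
          let d := PySem.Int.floordiv st2.2.1 weight
          let rem := PySem.Int.mod st2.2.1 weight
          let avail := PySem.List.pyRange 0 ins.2 1
          (st2.1 ++ unrankLoop avail.length avail f d (PySem.List.pyGetD offsets ins.1 0),
           (rem, weight)))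
        (pre, (((r : Nat) : Int), ((prodFact sizes : Nat) : Int)))).1)
    = (shiftedProd off sizes).map (fun t => pre ++ t) := by
  induction sizes with
  | nil =>
    intro offsets s pre off _
    simp [prodFact, shiftedProd, PySem.List.enumerate_nil]
  | cons ns rest ih =>
    intro offsets s pre off hoff
    have hfp : 0 < Nat.factorial ns.toNat := Nat.factorial_pos _
    have hTp : 0 < prodFact rest := by
      unfold prodFact
      exact List.prod_pos (by intro x hx; simp at hx; obtain ⟨y, _, rfl⟩ := hx; exact Nat.factorial_pos _)
    have hP : prodFact (ns :: rest) = Nat.factorial ns.toNat * prodFact rest := by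
      simp [prodFact]
    have hoff0 : PySem.List.pyGetD offsets ((s : Nat) : Int) 0 = off := by
      have := hoff 0 (by simp)
      simpa using this
    -- rewrite each entry of the outer map: do the first band's step
    have hstep : ∀ r : Nat, r ∈ List.range (prodFact (ns :: rest)) →
        ((PySem.List.enumerate (ns :: rest) ((s : Nat) : Int)).foldl
          (fun st2 ins =>
            let f := factP ins.2
            let weight := PySem.Int.floordiv st2.2.2 f
            let d := PySem.Int.floordiv st2.2.1 weight
            let rem := PySem.Int.mod st2.2.1 weight
            let avail := PySem.List.pyRange 0 ins.2 1
            (st2.1 ++ unrankLoop avail.length avail f d (PySem.List.pyGetD offsets ins.1 0),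
             (rem, weight)))
          (pre, (((r : Nat) : Int), ((prodFact (ns :: rest) : Nat) : Int)))).1
        = ((PySem.List.enumerate rest (((s + 1 : Nat) : Nat) : Int)).foldl
          (fun st2 ins =>
            let f := factP ins.2
            let weight := PySem.Int.floordiv st2.2.2 f
            let d := PySem.Int.floordiv st2.2.1 weight
            let rem := PySem.Int.mod st2.2.1 weight
            let avail := PySem.List.pyRange 0 ins.2 1
            (st2.1 ++ unrankLoop avail.length avail f d (PySem.List.pyGetD offsets ins.1 0),
             (rem, weight)))
          (pre ++ unrankLoop ns.toNat (PySem.List.pyRange 0 ns 1)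
              ((Nat.factorial ns.toNat : Nat) : Int) (((r / prodFact rest : Nat) : Nat) : Int) off,
           ((((r % prodFact rest : Nat) : Nat) : Int), ((prodFact rest : Nat) : Int)))).1 := by
      intro r hrm
      rw [PySem.List.enumerate_cons, List.foldl_cons]
      simp only [factP_eq]
      have hw : PySem.Int.floordiv ((prodFact (ns :: rest) : Nat) : Int)
          ((Nat.factorial ns.toNat : Nat) : Int) = ((prodFact rest : Nat) : Int) := by
        rw [PySem.Int.floordiv_natCast]
        congr 1
        rw [hP, Nat.mul_div_cancel_left _ hfp]
      rw [hw, PySem.Int.floordiv_natCast, PySem.Int.mod_natCast, hoff0]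
      congr 2
      rw [PySem.List.length_pyRange_one]
      simp
    have h1 := List.map_congr_left hstep
    rw [h1, hP, range_mul_decode (prodFact rest) hTp
      (fun d0 k0 => ((PySem.List.enumerate rest (((s + 1 : Nat) : Nat) : Int)).foldl
          (fun st2 ins =>
            let f := factP ins.2
            let weight := PySem.Int.floordiv st2.2.2 f
            let d := PySem.Int.floordiv st2.2.1 weight
            let rem := PySem.Int.mod st2.2.1 weight
            let avail := PySem.List.pyRange 0 ins.2 1
            (st2.1 ++ unrankLoop avail.length avail f d (PySem.List.pyGetD offsets ins.1 0),
             (rem, weight)))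
          (pre ++ unrankLoop ns.toNat (PySem.List.pyRange 0 ns 1)
              ((Nat.factorial ns.toNat : Nat) : Int) ((d0 : Nat) : Int) off,
           (((k0 : Nat) : Int), ((prodFact rest : Nat) : Int)))).1)
      (Nat.factorial ns.toNat)]
    -- rewrite shiftedProd and push (pre ++ ·) inside
    rw [show shiftedProd off (ns :: rest)
        = ((pyPermutations (PySem.List.pyRange 0 ns 1)).map (fun perm => perm.map (fun m => off + m))).flatMap
            (fun t => (shiftedProd (off + ns) rest).map (fun u => t ++ u)) from rfl]
    rw [List.map_flatMap]
    -- replace the shifted permutation list by the range-of-unrank list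
    have hlen : (PySem.List.pyRange 0 ns 1).length = ns.toNat := by
      rw [PySem.List.length_pyRange_one]; simp
    have hperm := unrank_perms (PySem.List.pyRange 0 ns 1).length (PySem.List.pyRange 0 ns 1) rfl off
    rw [hlen] at hperm
    rw [show pyPermutations (PySem.List.pyRange 0 ns 1)
        = pyPermsFuel (PySem.List.pyRange 0 ns 1).length (PySem.List.pyRange 0 ns 1) from rfl, hlen,
      ← hperm]
    rw [List.flatMap_map]
    refine List.flatMap_congr ?_
    intro d0 hd0
    -- inner: apply IH with new prefix and offset
    have hoff' : ∀ j : Nat, j < rest.length →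
        PySem.List.pyGetD offsets (((s + 1 + j : Nat) : Nat) : Int) 0 = (off + ns) + (rest.take j).sum := by
      intro j hj
      have h := hoff (j + 1) (by simp; omega)
      rw [show s + (j + 1) = s + 1 + j by omega] at h
      have hns0 : (ns :: rest).take (j + 1) = ns :: rest.take j := rfl
      rw [h, hns0]
      simp
      ring
    have hih := ih offsets (s + 1)
      (pre ++ unrankLoop ns.toNat (PySem.List.pyRange 0 ns 1)
        ((Nat.factorial ns.toNat : Nat) : Int) ((d0 : Nat) : Int) off)
      (off + ns) hoff'
    refine Eq.trans hih ?_
    simp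

theorem B_eq (sizes : List Int) : build_perm_relabelings_alt sizes = shiftedProd 0 sizes := by
  simp only [build_perm_relabelings_alt]
  rw [show sizes.foldl (fun st ns => (st.1 ++ [st.2], st.2 + ns)) (([] : List Int), (0 : Int))
      = ([] ++ offsB 0 sizes, 0 + sizes.sum) from offsB_fold sizes [] 0]
  rw [total_fold sizes 1, one_mul]
  rw [foldl_append_map]
  rw [PySem.List.pyRange_zero_nat]
  rw [List.map_map]
  have hoff : ∀ j : Nat, j < sizes.length →
      PySem.List.pyGetD ([] ++ offsB 0 sizes) (((0 + j : Nat) : Nat) : Int) 0 = 0 + (sizes.take j).sum := by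
    intro j hj
    simpa using offsB_getD sizes 0 j hj
  have hd := decode_fold sizes ([] ++ offsB 0 sizes) 0 [] 0 hoff
  simp only [Nat.cast_zero] at hd
  simpa using hd

-- ===== VERDICT (by name: the statement is the Claim_ definition above) =====
theorem build_perm_relabelings_spec : Claim_equal_build_perm_relabelings := by
  intro bs _ hpre
  unfold Spec_build_perm_relabelings
  rcases hpre with hpre | hpre
  · rw [A_eq bs hpre, B_eq bs]
  · rw [A_eq_nonpos bs hpre, B_eq bs, shiftedProd_nonpos bs 0 hpre]
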